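-- pv_equiv track=rewrite | github.com/flong-mrc/aceDRG | acedrg/chem.py | setHName
-- ===== SOURCE A (Python) =====
-- from builtins   import str
--
-- def setHName(tHConnAtom, tOtheAtmSet, tAllHIds):
--
--     nAllH =len(tAllHIds)
--     reName = "H" + str(nAllH +1)
--     hIds = []
--     for aA in tOtheAtmSet:
--         if aA["type_symbol"].strip() == "H":
--              hIds.append(aA["atom_id"])
--
--     hIds.sort()
--     nL = len(tHConnAtom["atom_id"])
--     nH = len(hIds)
--     if nH ==0:
--        aId = "H" + str(nAllH)
--        if aId in tAllHIds:
--            reName = "H" + str(nAllH +1)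
--        else:
--            if nL==1:
--                aId1 = "H"
--                aId2 = "H" + tHConnAtom["type_symbol"]
--                if not aId1 in tAllHIds:
--                    reName = aId1
--                elif not aId2 in tAllHIds:
--                    reName = aId2
--     elif nH==1:
--          aId = hIds[0] + "2"
--          if not aId in tAllHIds:
--              reName = aId
--     else:
--
--         if hIds[-1][-1].isdigit():
--             aN = int(hIds[-1][-1]) + 1
--             aId = hIds[-1][0:-1] + str(aN)
--             if not aId in tAllHIds:
--                 reName = aId
--
--     return reName
-- ===== SOURCE B (Python) =====
-- def setHName(tHConnAtom, tOtheAtmSet, tAllHIds):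
--     # One-pass (count, running max) accumulator instead of building+sorting an id list,
--     # then a unified candidate-list / first-fit search instead of per-branch membership tests.
--     nH = 0
--     m = None
--     for aA in tOtheAtmSet:
--         if aA["type_symbol"].strip() == "H":
--             a = aA["atom_id"]
--             nH += 1
--             if m is None or a > m:
--                 m = a
--     if nH == 0:
--         if "H" + str(len(tAllHIds)) in tAllHIds or len(tHConnAtom["atom_id"]) != 1:
--             cands = []
--         else:
--             cands = ["H", "H" + tHConnAtom["type_symbol"]]
--     elif nH == 1:
--         cands = [m + "2"]
--     elif m[-1].isdigit():
--         cands = [m[:-1] + str(int(m[-1]) + 1)]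
--     else:
--         cands = []
--     for c in cands:
--         if c not in tAllHIds:
--             return c
--     return "H" + str(len(tAllHIds) + 1)
-- ===== Notes on version B (the rewrite author's own statement) =====
-- stated objective: alternative
-- what changed: B never builds or sorts the id list: a single pass over tOtheAtmSet keeps only a (count, running-max) accumulator, and the per-branch membership tests and reName mutations are replaced by constructing one ordered candidate list and returning its first name not already in tAllHIds.
import Mathlib
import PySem

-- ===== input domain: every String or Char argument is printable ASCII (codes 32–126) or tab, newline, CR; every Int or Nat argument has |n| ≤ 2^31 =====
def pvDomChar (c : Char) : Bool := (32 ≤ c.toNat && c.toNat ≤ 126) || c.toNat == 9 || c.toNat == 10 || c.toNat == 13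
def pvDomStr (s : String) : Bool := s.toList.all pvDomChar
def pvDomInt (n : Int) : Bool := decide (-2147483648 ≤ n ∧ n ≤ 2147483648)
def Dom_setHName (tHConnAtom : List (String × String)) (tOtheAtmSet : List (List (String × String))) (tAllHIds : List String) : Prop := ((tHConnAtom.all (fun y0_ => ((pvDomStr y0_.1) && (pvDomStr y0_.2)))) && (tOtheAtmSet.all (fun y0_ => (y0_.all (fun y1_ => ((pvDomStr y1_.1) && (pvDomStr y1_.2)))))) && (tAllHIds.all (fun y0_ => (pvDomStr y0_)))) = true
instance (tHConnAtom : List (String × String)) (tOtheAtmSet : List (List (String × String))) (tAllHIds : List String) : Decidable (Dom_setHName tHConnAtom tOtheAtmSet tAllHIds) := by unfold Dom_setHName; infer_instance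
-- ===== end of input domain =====

-- B replaces the build-list/sort/index pipeline by a one-pass (count, running-max) accumulator
-- and a unified candidate-list + first-fit search (return value only; neither version mutates).

-- ===== PORT A =====
def setHName (tHConnAtom : List (String × String)) (tOtheAtmSet : List (List (String × String))) (tAllHIds : List String) : String :=
  let nAllH : Int := tAllHIds.length
  let reName := "H" ++ PySem.Int.toStr (nAllH + 1)
  let hIds0 := tOtheAtmSet.foldl (fun acc aA =>
      if PySem.Str.strip ((PySem.Dict.mk aA).getD "type_symbol" "") == "H"
      then acc ++ [(PySem.Dict.mk aA).getD "atom_id" ""] else acc) []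
  let hIds := PySem.List.sorted hIds0 (fun x => x) false
  let nL := PySem.Str.len ((PySem.Dict.mk tHConnAtom).getD "atom_id" "")
  let nH := hIds.length
  if nH = 0 then
    let aId := "H" ++ PySem.Int.toStr nAllH
    if aId ∈ tAllHIds then "H" ++ PySem.Int.toStr (nAllH + 1)
    else if nL = 1 then
      let aId1 := "H"
      let aId2 := "H" ++ (PySem.Dict.mk tHConnAtom).getD "type_symbol" ""
      if aId1 ∉ tAllHIds then aId1
      else if aId2 ∉ tAllHIds then aId2
      else reName
    else reName
  else if nH = 1 then
    let aId := PySem.List.pyGetD hIds 0 "" ++ "2"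
    if aId ∉ tAllHIds then aId else reName
  else
    let last := PySem.List.pyGetD hIds (-1) ""
    match PySem.Str.pyGet? last (-1) with
    | none => reName   -- hIds[-1][-1] raises IndexError: excluded by Pre_
    | some ch =>
      if PySem.Chars.isdigit ch then
        let aN := (PySem.Int.ofChars? [ch]).getD 0 + 1
        let aId := PySem.Str.slice last (some 0) (some (-1)) ++ PySem.Int.toStr aN
        if aId ∉ tAllHIds then aId else reName
      else reName

-- ===== PORT B =====
-- the single-pass accumulator step: count H atoms and keep the running maximum id
def hStep (st : Int × Option String) (aA : List (String × String)) : Int × Option String :=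
  if PySem.Str.strip ((PySem.Dict.mk aA).getD "type_symbol" "") == "H" then
    let a := (PySem.Dict.mk aA).getD "atom_id" ""
    (st.1 + 1,
     match st.2 with
     | none => some a
     | some m => if m < a then some a else some m)
  else st

-- the first-fit loop: first candidate not already used, else the fallback name
def firstFresh (cands : List String) (used : List String) (fallback : String) : String :=
  match cands with
  | [] => fallback
  | c :: rest => if c ∉ used then c else firstFresh rest used fallback

def setHName_alt (tHConnAtom : List (String × String)) (tOtheAtmSet : List (List (String × String))) (tAllHIds : List String) : String :=
  let st := tOtheAtmSet.foldl hStep (0, none)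
  let m := st.2.getD ""
  let cands : List String :=
    if st.1 = 0 then
      if ("H" ++ PySem.Int.toStr (tAllHIds.length : Int)) ∈ tAllHIds ∨
         PySem.Str.len ((PySem.Dict.mk tHConnAtom).getD "atom_id" "") ≠ 1 then []
      else ["H", "H" ++ (PySem.Dict.mk tHConnAtom).getD "type_symbol" ""]
    else if st.1 = 1 then [m ++ "2"]
    else
      match PySem.Str.pyGet? m (-1) with
      | none => []   -- m[-1] raises IndexError in Python: excluded by Pre_
      | some ch =>
        if PySem.Chars.isdigit ch
        then [PySem.Str.slice m (some 0) (some (-1)) ++ PySem.Int.toStr ((PySem.Int.ofChars? [ch]).getD 0 + 1)]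
        else []
  firstFresh cands tAllHIds ("H" ++ PySem.Int.toStr ((tAllHIds.length : Int) + 1))

-- ===== PRECONDITION & SPEC =====
-- the H-atom ids A collects, and the maximum of a nonempty id list (used only by Pre_)
def hIdsOf (tOtheAtmSet : List (List (String × String))) : List String :=
  (tOtheAtmSet.filter (fun aA =>
      PySem.Str.strip ((PySem.Dict.mk aA).getD "type_symbol" "") == "H")).map
      (fun aA => (PySem.Dict.mk aA).getD "atom_id" "")

def maxIdOf (l : List String) : String :=
  match l with
  | [] => ""
  | x :: t => t.foldl max x

-- Pre_ excludes exactly the inputs on which A raises: a KeyError on tHConnAtom["atom_id"],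
-- on aA["type_symbol"]/aA["atom_id"], or on tHConnAtom["type_symbol"] in the reachable branch,
-- and the IndexError hIds[-1][-1] when the maximal collected H id is the empty string.
def Pre_setHName (tHConnAtom : List (String × String)) (tOtheAtmSet : List (List (String × String))) (tAllHIds : List String) : Prop :=
  (PySem.Dict.mk tHConnAtom).contains "atom_id" = true
  ∧ (∀ aA ∈ tOtheAtmSet, (PySem.Dict.mk aA).contains "type_symbol" = true ∧
      (PySem.Str.strip ((PySem.Dict.mk aA).getD "type_symbol" "") = "H" →
        (PySem.Dict.mk aA).contains "atom_id" = true))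
  ∧ (2 ≤ (hIdsOf tOtheAtmSet).length → maxIdOf (hIdsOf tOtheAtmSet) ≠ "")
  ∧ (hIdsOf tOtheAtmSet = [] ∧ ("H" ++ PySem.Int.toStr (tAllHIds.length : Int)) ∉ tAllHIds ∧
      PySem.Str.len ((PySem.Dict.mk tHConnAtom).getD "atom_id" "") = 1 →
      (PySem.Dict.mk tHConnAtom).contains "type_symbol" = true)

instance (tHConnAtom : List (String × String)) (tOtheAtmSet : List (List (String × String))) (tAllHIds : List String) : Decidable (Pre_setHName tHConnAtom tOtheAtmSet tAllHIds) := by unfold Pre_setHName; infer_instance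

def pvWitness_setHName : (List (String × String)) × (List (List (String × String))) × List String :=
  ([("atom_id", "C1"), ("type_symbol", "C")], [[("type_symbol", "H"), ("atom_id", "H1")]], ["H1"])

def Spec_setHName (tHConnAtom : List (String × String)) (tOtheAtmSet : List (List (String × String))) (tAllHIds : List String) (out : String) : Prop := out = setHName_alt tHConnAtom tOtheAtmSet tAllHIds
instance (tHConnAtom : List (String × String)) (tOtheAtmSet : List (List (String × String))) (tAllHIds : List String) (out : String) : Decidable (Spec_setHName tHConnAtom tOtheAtmSet tAllHIds out) := by unfold Spec_setHName; infer_instance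

-- ===== CLAIM (what is proved, stated in full; the proofs are below) =====
def Claim_equal_setHName : Prop := ∀ (tHConnAtom : List (String × String)) (tOtheAtmSet : List (List (String × String))) (tAllHIds : List String), Dom_setHName tHConnAtom tOtheAtmSet tAllHIds → Pre_setHName tHConnAtom tOtheAtmSet tAllHIds → Spec_setHName tHConnAtom tOtheAtmSet tAllHIds (setHName tHConnAtom tOtheAtmSet tAllHIds)

-- ===== LEMMAS AND PROOFS =====

-- in a (≤)-sorted list every element is at most the last one
theorem pairwise_le_getLast {l : List String} (hp : l.Pairwise (· ≤ ·)) (hne : l ≠ [])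
    {y : String} (hy : y ∈ l) : y ≤ l.getLast hne := by
  rw [List.pairwise_iff_getElem] at hp
  obtain ⟨i, hi, rfl⟩ := List.getElem_of_mem hy
  rw [List.getLast_eq_getElem]
  rcases Nat.lt_or_ge i (l.length - 1) with h | h
  · exact hp i (l.length - 1) hi (by omega) h
  · have : i = l.length - 1 := by omega
    subst this; exact le_refl _

-- the last element of sorted(x::t) is the running maximum t.foldl max x
theorem sorted_last_eq_foldl_max (x : String) (t : List String) :
    PySem.List.pyGetD (PySem.List.sorted (x :: t) (fun y => y) false) (-1) "" = t.foldl max x := by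
  have hne : PySem.List.sorted (x :: t) (fun y => y) false ≠ [] := by
    simp [PySem.List.sorted_eq_nil_iff]
  rw [PySem.List.pyGetD_neg_one _ "" hne]
  have hperm := PySem.List.sorted_perm (x :: t) (fun y => y) false
  have hp : (PySem.List.sorted (x :: t) (fun y => y) false).Pairwise (· ≤ ·) :=
    PySem.List.sorted_pairwise (x :: t) (fun y => y)
  have hmax := PySem.List.le_foldl_max t x
  apply le_antisymm
  · have hmem : (PySem.List.sorted (x :: t) (fun y => y) false).getLast hne ∈ x :: t :=
      hperm.mem_iff.mp (List.getLast_mem hne)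
    rcases List.mem_cons.mp hmem with h | h
    · rw [h]; exact hmax.1
    · exact hmax.2 _ h
  · have hmem : t.foldl max x ∈ PySem.List.sorted (x :: t) (fun y => y) false := by
      rw [hperm.mem_iff]
      rcases PySem.List.foldl_max_mem t x with h | h
      · rw [h]; exact List.mem_cons_self
      · exact List.mem_cons_of_mem _ h
    exact pairwise_le_getLast hp hne hmem

-- the max-step of hStep is Mathlib's max
theorem step_max (m a : String) : (if m < a then a else m) = max m a := by
  by_cases h : m < a
  · simp [h, max_eq_right h.le]
  · simp [h, max_eq_left (le_of_not_gt h)]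

-- B's fold computes the length and running maximum of the collected id list
theorem foldl_hStep_eq (l : List (List (String × String))) (n : Int) (mo : Option String) :
    l.foldl hStep (n, mo) =
      (n + ((hIdsOf l).length : Int),
       (hIdsOf l).foldl (fun mo a => match mo with
          | none => some a
          | some m => if m < a then some a else some m) mo) := by
  induction l generalizing n mo with
  | nil => simp [hIdsOf]
  | cons aA t ih =>
    by_cases h : PySem.Str.strip ((PySem.Dict.mk aA).getD "type_symbol" "") == "H"
    · have hids : hIdsOf (aA :: t) = (PySem.Dict.mk aA).getD "atom_id" "" :: hIdsOf t := by
        simp [hIdsOf, h]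
      simp only [List.foldl_cons, hStep, h, if_true, ih, hids, List.length_cons, Prod.mk.injEq]
      exact ⟨by push_cast; ring, trivial⟩
    · have hids : hIdsOf (aA :: t) = hIdsOf t := by
        simp [hIdsOf, h]
      simp [hStep, h, hids, ih]

-- the option-fold over a nonempty list is some of the plain max fold
theorem optfold_eq (x : String) (t : List String) :
    t.foldl (fun mo a => match mo with
          | none => some a
          | some m => if m < a then some a else some m) (some x) = some (t.foldl max x) := by
  induction t generalizing x with
  | nil => rfl
  | cons y t ih =>
    simp only [List.foldl_cons]
    have hinit : (if x < y then some y else some x) = some (max x y) := by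
      rw [← step_max x y]; exact (apply_ite some (x < y) y x).symm
    rw [hinit, ih]

theorem main_eq (tHConnAtom : List (String × String)) (tOtheAtmSet : List (List (String × String))) (tAllHIds : List String) :
    setHName tHConnAtom tOtheAtmSet tAllHIds = setHName_alt tHConnAtom tOtheAtmSet tAllHIds := by
  unfold setHName setHName_alt
  rw [PySem.List.foldl_append_if, foldl_hStep_eq]
  simp only [List.nil_append]
  rcases hh : (tOtheAtmSet.filter (fun aA =>
      PySem.Str.strip ((PySem.Dict.mk aA).getD "type_symbol" "") == "H")).map
      (fun aA => (PySem.Dict.mk aA).getD "atom_id" "") with _ | ⟨x, t⟩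
  · have hids : hIdsOf tOtheAtmSet = [] := hh
    have hlen := PySem.List.length_sorted ([] : List String) (fun z => z) false
    rw [hids]
    simp only [hlen, List.length_nil, List.foldl_nil, add_zero, if_true,
      CharP.cast_eq_zero]
    by_cases h1 : ("H" ++ PySem.Int.toStr (tAllHIds.length : Int)) ∈ tAllHIds <;>
      by_cases h2 : PySem.Str.len ((PySem.Dict.mk tHConnAtom).getD "atom_id" "") = 1 <;>
      simp [firstFresh, h1] <;> split_ifs <;> simp_all [firstFresh]
  · have hids : hIdsOf tOtheAtmSet = x :: t := hh
    rw [hids]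
    rcases t with _ | ⟨y, t'⟩
    · rw [PySem.List.sorted_eq_self_of_pairwise _ _ (by simp)]
      simp only [List.length_cons, List.length_nil, List.foldl_cons, List.foldl_nil]
      simp [firstFresh, PySem.List.pyGetD_zero_cons]
    · have hlen := PySem.List.length_sorted (x :: y :: t') (fun z => z) false
      have hinit : (if x < y then some y else some x) = some (max x y) := by
        rw [← step_max x y]; exact (apply_ite some (x < y) y x).symm
      rw [sorted_last_eq_foldl_max]
      simp only [List.foldl_cons, hinit, optfold_eq, Option.getD_some, hlen, List.length_cons]
      rw [if_neg (by omega), if_neg (by omega), if_neg (by push_cast; omega),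
        if_neg (by push_cast; omega)]
      rcases hg : PySem.Str.pyGet? (List.foldl max (max x y) t') (-1) with _ | ch
      · simp [firstFresh]
      · by_cases hd : PySem.Chars.isdigit ch
        · simp [hd, firstFresh]
        · simp [hd, firstFresh]

-- ===== VERDICT (by name: the statement is the Claim_ definition above) =====
theorem setHName_spec : Claim_equal_setHName := by
  intro a b c _ _
  unfold Spec_setHName
  exact main_eq a b c
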